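-- pv_equiv track=rewrite | github.com/Aryudesu/ABC | typical90/006.py | calc_nex
-- ===== SOURCE A (Python) =====
-- def calc_nex(S):
--     N = len(S)
--     res = [[N] * 26 for _ in range(N + 1)]
--     for i in range(N - 1, -1, -1):
--         for j in range(26):
--             res[i][j] = res[i + 1][j]
--         res[i][ord(S[i]) - ord('a')] = i
--     return res
-- ===== SOURCE B (Python) =====
-- def calc_nex(S):
--     # direct definition: each cell probes forward for the next occurrence (no DP)
--     N = len(S)
--     table = []
--     for i in range(N + 1):
--         row = []
--         for ch in "abcdefghijklmnopqrstuvwxyz":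
--             j = i
--             while j < N and S[j] != ch:
--                 j += 1
--             row.append(j)
--         table.append(row)
--     return table
-- ===== Notes on version B (the rewrite author's own statement) =====
-- stated objective: alternative
-- what changed: B drops the DP table entirely: each cell (i,c) is computed independently by a forward linear probe from position i for letter c, instead of A's backward propagation of row i+1 into row i; B trades A's O(26N) for directness.
import Mathlib
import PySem

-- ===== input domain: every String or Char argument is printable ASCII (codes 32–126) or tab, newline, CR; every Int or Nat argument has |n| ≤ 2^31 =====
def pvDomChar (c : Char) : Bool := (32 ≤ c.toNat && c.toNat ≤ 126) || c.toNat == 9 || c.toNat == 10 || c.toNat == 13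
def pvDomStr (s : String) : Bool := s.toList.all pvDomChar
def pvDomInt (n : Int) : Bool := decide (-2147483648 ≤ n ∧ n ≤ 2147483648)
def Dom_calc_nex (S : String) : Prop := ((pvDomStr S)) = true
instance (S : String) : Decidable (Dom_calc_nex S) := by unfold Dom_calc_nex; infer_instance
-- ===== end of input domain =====

-- B drops A's DP table: each cell is an independent forward linear probe for its letter
-- (alternative algorithm, direct by definition; not faster — A is O(26N), B is O(26N^2)).

-- ===== PORT A =====
-- backward loop 'for i in range(N-1,-1,-1)': rows i..N built by recursion on the suffix;
-- row i = copy of row i+1 (the inner j-loop) with res[i][ord(S[i])-97] = i (Python list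
-- assignment, ported exactly by PySem.List.pySetD).
def pvARows (N : Int) (i : Int) (L : List Char) : List (List Int) :=
  match L with
  | [] => [List.replicate 26 N]
  | ch :: rest =>
    let tail := pvARows N (i+1) rest
    PySem.List.pySetD tail.headI ((ch.toNat : Int) - 97) i :: tail

def calc_nex (S : String) : List (List Int) :=
  pvARows ((S.toList.length : Int)) 0 S.toList

-- ===== PORT B =====
-- the inner "while j < N and S[j] != ch: j += 1" loop: structural recursion on the
-- suffix S[j:] (j < N ↔ suffix nonempty), returning the final j.
def pvProbe (suffix : List Char) (ch : Char) (j : Int) : Int :=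
  match suffix with
  | [] => j
  | d :: rest => if d ≠ ch then pvProbe rest ch (j+1) else j

def pvAlphabet : List Char := "abcdefghijklmnopqrstuvwxyz".toList

def calc_nex_alt (S : String) : List (List Int) :=
  let L := S.toList
  (List.range (L.length + 1)).map (fun i =>
    pvAlphabet.map (fun ch => pvProbe (L.drop i) ch (i : Int)))

-- ===== PRECONDITION & SPEC =====
-- Pre_ restricts to strings over the lowercase alphabet a–z, the natural domain of this
-- 26-letter next-occurrence table: on any other printable character A raises IndexError
-- (ord(c)-97 outside -26..25), except for 'G'..'`' where Python's negative list indexing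
-- lands on an accidental column; B never performs that indexing.
def Pre_calc_nex (S : String) : Prop := S.toList.all (fun c => 97 ≤ c.toNat && c.toNat ≤ 122) = true
instance (S : String) : Decidable (Pre_calc_nex S) := by unfold Pre_calc_nex; infer_instance
def pvWitness_calc_nex : String := "abca"

def Spec_calc_nex (S : String) (out : List (List Int)) : Prop := out = calc_nex_alt S
instance (S : String) (out : List (List Int)) : Decidable (Spec_calc_nex S out) := by unfold Spec_calc_nex; infer_instance

-- ===== CLAIM (what is proved, stated in full; the proofs are below) =====
def Claim_equal_calc_nex : Prop := ∀ (S : String), Dom_calc_nex S → Pre_calc_nex S → Spec_calc_nex S (calc_nex S)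

-- ===== LEMMAS AND PROOFS =====

lemma pvAlphabet_length : pvAlphabet.length = 26 := by rfl

lemma pvAlphabet_toNat : ∀ n, (h : n < 26) → (pvAlphabet.getD n ' ').toNat = 97 + n := by
  intro n h
  interval_cases n <;> rfl

lemma char_toNat_inj {a b : Char} (h : a.toNat = b.toNat) : a = b := by
  have ha := Char.ofNat_toNat (c := a)
  have hb := Char.ofNat_toNat (c := b)
  rw [← ha, ← hb, h]

lemma pvProbe_cons (d : Char) (rest : List Char) (ch : Char) (j : Int) :
    pvProbe (d :: rest) ch j = if d = ch then j else pvProbe rest ch (j+1) := by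
  by_cases h : d = ch <;> simp [pvProbe, h]

lemma pySetD_map_alpha (f : Char → Int) (c0 : Char) (v : Int)
    (h0 : 97 ≤ c0.toNat) (h1 : c0.toNat ≤ 122) :
    PySem.List.pySetD (pvAlphabet.map f) ((c0.toNat : Int) - 97) v
      = pvAlphabet.map (fun c => if c0 = c then v else f c) := by
  have hge : (0 : Int) ≤ (c0.toNat : Int) - 97 := by omega
  rw [PySem.List.pySetD_of_nonneg _ _ hge]
  apply List.ext_getElem
  · simp
  · intro n h₁ h₂
    have hn : n < 26 := by simpa [pvAlphabet_length] using h₂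
    have htn : (pvAlphabet[n]).toNat = 97 + n := by
      have h' := pvAlphabet_toNat n hn
      rwa [List.getD_eq_getElem _ _ (by simpa [pvAlphabet_length] using hn)] at h'
    simp only [List.getElem_set, List.getElem_map]
    by_cases he : c0 = pvAlphabet[n]
    · have ht : ((c0.toNat : Int) - 97).toNat = n := by
        rw [he, htn]; omega
      rw [if_pos ht]; exact (if_pos he).symm
    · have hne : c0.toNat ≠ 97 + n := by
        intro hc
        exact he (char_toNat_inj (by rw [hc, htn]))
      have ht : ((c0.toNat : Int) - 97).toNat ≠ n := by omega
      rw [if_neg ht]; exact (if_neg he).symm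

lemma pvARows_eq (L : List Char) :
    ∀ i : Int, (∀ ch ∈ L, 97 ≤ ch.toNat ∧ ch.toNat ≤ 122) →
      pvARows (i + (L.length : Int)) i L = (List.range (L.length + 1)).map
        (fun k => pvAlphabet.map (fun ch => pvProbe (L.drop k) ch (i + (k : Int)))) := by
  induction L with
  | nil =>
    intro i _
    simp [pvARows, pvProbe, List.range_succ_eq_map, pvAlphabet_length]
  | cons ch0 rest ih =>
    intro i hlc
    have hch := hlc ch0 (by simp)
    have hrest : ∀ c ∈ rest, 97 ≤ c.toNat ∧ c.toNat ≤ 122 := fun c hc => hlc c (by simp [hc])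
    have hN : i + ((ch0 :: rest).length : Int) = (i+1) + (rest.length : Int) := by
      simp; omega
    show PySem.List.pySetD (pvARows (i + ((ch0 :: rest).length : Int)) (i+1) rest).headI
          ((ch0.toNat : Int) - 97) i
        :: pvARows (i + ((ch0 :: rest).length : Int)) (i+1) rest = _
    rw [hN, ih (i+1) hrest]
    simp only [List.length_cons]
    rw [List.range_succ_eq_map (n := rest.length + 1), List.map_cons, List.map_map]
    congr 1
    · -- head row
      rw [show ((List.range (rest.length + 1)).map
            (fun k => pvAlphabet.map
              (fun ch => pvProbe (rest.drop k) ch ((i+1) + (k : Int))))).headI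
          = pvAlphabet.map (fun ch => pvProbe rest ch (i+1)) by
            rw [List.range_succ_eq_map (n := rest.length)]; simp]
      rw [pySetD_map_alpha _ _ _ hch.1 hch.2]
      apply List.map_congr_left
      intro c _
      show (if ch0 = c then i else pvProbe rest c (i+1))
          = pvProbe ((ch0 :: rest).drop 0) c (i + ((0:Nat) : Int))
      rw [List.drop_zero, pvProbe_cons]
      norm_num
    · -- tail rows
      apply List.map_congr_left
      intro k hk
      simp only [Function.comp]
      have hd : (ch0 :: rest).drop (k+1) = rest.drop k := by simp
      rw [hd, show (i + ((k+1 : Nat) : Int)) = (i+1) + (k : Int) by push_cast; ring]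

-- ===== VERDICT (by name: the statement is the Claim_ definition above) =====
theorem calc_nex_spec : Claim_equal_calc_nex := by
  intro S _ hpre
  have hpre' : ∀ ch ∈ S.toList, 97 ≤ ch.toNat ∧ ch.toNat ≤ 122 := by
    intro ch hc
    have := List.all_eq_true.mp hpre ch hc
    simpa using this
  show calc_nex S = calc_nex_alt S
  unfold calc_nex calc_nex_alt
  have h := pvARows_eq S.toList 0 hpre'
  simpa using h
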